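-- pv_equiv track=rewrite | github.com/stoverp/advent-of-code | 2023/day11/part2.py | expand_cols
-- ===== SOURCE A (Python) =====
-- EXPANSION_SIZE = 999999
--
-- def expand_cols(sky):
--   empty_cols = set(i for i in range(len(sky[0])))
--   for line in sky:
--     for col, c in enumerate(line):
--       if c == "#" and col in empty_cols:
--         empty_cols.remove(col)
--   col_coords = [i for i in range(len(sky[0]))]
--   for col in empty_cols:
--     for i in range(col + 1, len(col_coords)):
--       col_coords[i] += EXPANSION_SIZE
--   return col_coords
-- ===== SOURCE B (Python) =====
-- EXPANSION_SIZE = 999999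
--
-- def expand_cols(sky):
--   filled = set()
--   for line in sky:
--     pos = line.find("#")
--     while pos != -1:
--       filled.add(pos)
--       pos = line.find("#", pos + 1)
--   coords = []
--   shift = 0
--   for i in range(len(sky[0])):
--     coords.append(i + shift)
--     if i not in filled:
--       shift += EXPANSION_SIZE
--   return coords
-- ===== Notes on version B (the rewrite author's own statement) =====
-- stated objective: faster
-- what changed: B drops A's per-empty-column suffix-addition pass (quadratic in the width) and per-character Python row scan: it collects '#' column positions with C-level str.find skips, then emits the coordinates in one left-to-right pass with a running expansion shift.
import Mathlib
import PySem

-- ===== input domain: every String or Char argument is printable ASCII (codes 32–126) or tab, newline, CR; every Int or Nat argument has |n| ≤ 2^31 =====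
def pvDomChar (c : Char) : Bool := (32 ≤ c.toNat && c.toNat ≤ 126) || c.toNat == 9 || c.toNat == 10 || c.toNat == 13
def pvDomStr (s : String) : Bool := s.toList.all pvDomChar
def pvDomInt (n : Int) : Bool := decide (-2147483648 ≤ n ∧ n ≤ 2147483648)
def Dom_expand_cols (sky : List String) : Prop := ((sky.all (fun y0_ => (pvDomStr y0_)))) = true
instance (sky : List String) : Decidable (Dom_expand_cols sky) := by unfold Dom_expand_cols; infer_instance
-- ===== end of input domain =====

-- B (faster, measured): instead of A's empty-column set plus one suffix-addition pass per empty
-- column, B collects the '#' column positions with str.find and emits the coordinates in one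
-- left-to-right pass with a running expansion shift.

-- ===== PORT A =====
-- one row of the removal loop: 'for col, c in enumerate(line): if c == "#" and col in empty_cols: empty_cols.remove(col)'
def pvRemoveLine (es : PySem.Set Int) (line : String) : PySem.Set Int :=
  (PySem.List.enumerate line.toList 0).foldl
    (fun es p => if p.2 = '#' ∧ PySem.Set.contains es p.1 then PySem.Set.discard es p.1 else es) es

-- one empty column's additions: 'for i in range(col + 1, len(col_coords)): col_coords[i] += EXPANSION_SIZE'
def pvAddRow (cc : List Int) (col : Int) : List Int :=
  (PySem.List.pyRange (col + 1) ((cc.length : Int)) 1).foldl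
    (fun cc i => cc.set i.toNat (cc.getD i.toNat 0 + 999999)) cc

def expand_cols (sky : List String) : List Int :=
  let w : Int := PySem.Str.len ((PySem.List.pyGet? sky 0).getD "")
  let empty : PySem.Set Int :=
    sky.foldl pvRemoveLine (PySem.Set.ofList (PySem.List.pyRange 0 w 1))
  -- iterating the Python set is safe here: the suffix additions commute, so the result is order-independent
  empty.foldl pvAddRow (PySem.List.pyRange 0 w 1)

-- ===== PORT B =====
-- the inner "while pos != -1" find loop; the fuel (length + 1) only guards termination and is
-- never exhausted: each found position is strictly larger than the previous one
def pvLineHashes (cs : List Char) : Nat → Int → PySem.Set Int → PySem.Set Int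
  | 0, _, filled => filled
  | fuel + 1, pos, filled =>
    if pos = -1 then filled
    else pvLineHashes cs fuel (PySem.Chars.findFrom cs ['#'] (pos + 1)) (PySem.Set.add filled pos)

-- 'pos = line.find("#"); while pos != -1: filled.add(pos); pos = line.find("#", pos + 1)'
def pvAddLine (filled : PySem.Set Int) (line : String) : PySem.Set Int :=
  pvLineHashes line.toList (line.toList.length + 1) (PySem.Chars.find line.toList ['#']) filled

def expand_cols_alt (sky : List String) : List Int :=
  let filled : PySem.Set Int := sky.foldl pvAddLine PySem.Set.empty
  let w : Int := PySem.Str.len ((PySem.List.pyGet? sky 0).getD "")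
  ((PySem.List.pyRange 0 w 1).foldl
      (fun st i =>
        (st.1 ++ [i + st.2], if !(PySem.Set.contains filled i) then st.2 + 999999 else st.2))
      (([] : List Int), (0 : Int))).1

-- ===== PRECONDITION & SPEC =====
-- A evaluates sky[0]; on the empty list it raises IndexError, so Pre_ excludes only sky = [].
def Pre_expand_cols (sky : List String) : Prop := sky ≠ []
instance (sky : List String) : Decidable (Pre_expand_cols sky) := by unfold Pre_expand_cols; infer_instance
def pvWitness_expand_cols : List String := ["#..", ".#."]

def Spec_expand_cols (sky : List String) (out : List Int) : Prop := out = expand_cols_alt sky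
instance (sky : List String) (out : List Int) : Decidable (Spec_expand_cols sky out) := by unfold Spec_expand_cols; infer_instance

-- ===== CLAIM (what is proved, stated in full; the proofs are below) =====
def Claim_equal_expand_cols : Prop := ∀ (sky : List String), Dom_expand_cols sky → Pre_expand_cols sky → Spec_expand_cols sky (expand_cols sky)

-- ===== LEMMAS AND PROOFS =====
-- Both ports are related to one index-wise description: coordinate j equals
-- j + 999999 * (number of empty columns strictly before j).

theorem pv_foldl_add_nodup (xs acc : List Int) (h : (acc ++ xs).Nodup) :
    xs.foldl PySem.Set.add acc = acc ++ xs := by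
  induction xs generalizing acc with
  | nil => simp
  | cons x t ih =>
    have hx : x ∉ acc := by
      simp [List.nodup_append] at h
      intro hmem
      exact (h.2.2 x hmem).1 rfl
    have hadd : PySem.Set.add acc x = acc ++ [x] := by
      simp [PySem.Set.add, PySem.Set.contains, hx]
    rw [List.foldl_cons, hadd, ih]
    · simp
    · simpa using h

theorem pv_ofList_nodup (xs : List Int) (h : xs.Nodup) : PySem.Set.ofList xs = xs := by
  have := pv_foldl_add_nodup xs [] (by simpa using h)
  simpa [PySem.Set.ofList, PySem.Set.empty] using this

theorem pv_removeLine_enum (cs : List Char) (s : Int) (es : List Int) :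
    (PySem.List.enumerate cs s).foldl
      (fun es p => if p.2 = '#' ∧ PySem.Set.contains es p.1 then PySem.Set.discard es p.1 else es) es
    = es.filter (fun x => !((PySem.List.enumerate cs s).any (fun p => p.2 == '#' && p.1 == x))) := by
  induction cs generalizing s es with
  | nil => simp [PySem.List.enumerate_nil]
  | cons c t ih =>
    rw [PySem.List.enumerate_cons, List.foldl_cons]
    by_cases hc : c = '#'
    · subst hc
      have hstep : (if (s, '#').2 = '#' ∧ PySem.Set.contains es (s, '#').1 then PySem.Set.discard es (s, '#').1 else es)
          = es.filter (fun y => !(y == s)) := by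
        by_cases hmem : s ∈ es
        · have h1 : PySem.Set.contains es s = true := by
            simpa [PySem.Set.contains] using hmem
          rw [if_pos ⟨rfl, h1⟩]
          rfl
        · have h1 : ¬ ((s, '#').2 = '#' ∧ PySem.Set.contains es (s, '#').1 = true) := by
            simp [PySem.Set.contains, hmem]
          rw [if_neg h1]
          refine (List.filter_eq_self.mpr ?_).symm
          intro y hy
          have : y ≠ s := fun h => hmem (h ▸ hy)
          simp [this]
      rw [hstep, ih, List.filter_filter]
      apply List.filter_congr
      intro x hx
      simp only [List.any_cons, beq_self_eq_true, Bool.true_and, Bool.not_or, Bool.beq_comm]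
      rw [Bool.and_comm]
    · have hstep : (if (s, c).2 = '#' ∧ PySem.Set.contains es (s, c).1 then PySem.Set.discard es (s, c).1 else es) = es := by
        simp [hc]
      rw [hstep, ih]
      apply List.filter_congr
      intro x hx
      simp [hc]

theorem pv_fold_removeLine (lines : List String) (es : List Int) :
    lines.foldl pvRemoveLine es
    = es.filter (fun x => !(lines.any (fun line =>
        (PySem.List.enumerate line.toList 0).any (fun p => p.2 == '#' && p.1 == x)))) := by
  induction lines generalizing es with
  | nil => simp
  | cons line rest ih =>
    rw [List.foldl_cons]
    show rest.foldl pvRemoveLine (pvRemoveLine es line) = _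
    rw [pvRemoveLine, pv_removeLine_enum, ih, List.filter_filter]
    apply List.filter_congr
    intro x hx
    simp only [List.any_cons, Bool.not_or]
    rw [Bool.and_comm]

theorem pv_anyEnum (cs : List Char) (x : Int) (hx : 0 ≤ x) :
    ((PySem.List.enumerate cs 0).any (fun p => p.2 == '#' && p.1 == x))
    = (cs[x.toNat]? == some '#') := by
  rw [Bool.eq_iff_iff]
  simp only [List.any_eq_true, Bool.and_eq_true, beq_iff_eq, PySem.List.mem_enumerate_iff]
  constructor
  · rintro ⟨p, ⟨k, hk, rfl⟩, h1, h2⟩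
    simp only at h1 h2
    have : x.toNat = k := by omega
    rw [this, List.getElem?_eq_getElem hk, h1]
  · intro h
    have hk : x.toNat < cs.length := by
      by_contra hbad
      rw [List.getElem?_eq_none (by omega)] at h
      simp at h
    refine ⟨(0 + (x.toNat : Int), cs[x.toNat]), ⟨x.toNat, hk, rfl⟩, ?_, by omega⟩
    simp only
    rw [List.getElem?_eq_getElem hk] at h
    exact Option.some_injective _ h

-- B-side characterization of the filled set
def pvHashAt (sky : List String) (x : Int) : Bool :=
  sky.any (fun line => line.toList[x.toNat]? == some '#')

theorem pv_prefix_hash (l : List Char) : (['#'] <+: l) ↔ l[0]? = some '#' := by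
  constructor
  · rintro ⟨t, rfl⟩; rfl
  · intro h
    rcases l with _ | ⟨c, t⟩
    · simp at h
    · simp at h; subst h; exact ⟨t, rfl⟩

theorem pv_lineHashes_mem (cs : List Char) :
    ∀ (fuel k : Nat) (filled : PySem.Set Int) (x : Int), k ≤ cs.length → cs.length - k < fuel →
    (x ∈ pvLineHashes cs fuel (PySem.Chars.findFrom cs ['#'] (k : Int)) filled ↔
      x ∈ filled ∨ ∃ j : Nat, k ≤ j ∧ ∃ h : j < cs.length, cs[j] = '#' ∧ x = (j : Int)) := by
  intro fuel
  induction fuel with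
  | zero => intro k filled x hk hf; omega
  | succ fl ih =>
    intro k filled x hk hf
    by_cases hneg : PySem.Chars.findFrom cs ['#'] (k : Int) = -1
    · rw [pvLineHashes, if_pos hneg]
      rw [PySem.Chars.findFrom_natCast_eq_neg_one_iff cs ['#'] k hk] at hneg
      rw [List.singleton_infix_iff] at hneg
      constructor
      · exact Or.inl
      · rintro (h | ⟨j, hkj, hj, hc, rfl⟩)
        · exact h
        · exfalso
          apply hneg
          rw [List.mem_iff_getElem]
          exact ⟨j - k, by simp; omega, by rw [List.getElem_drop]; rw [← hc]; congr 1; omega⟩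
    · obtain ⟨hge, hpre, hmin⟩ := PySem.Chars.findFrom_natCast_spec cs ['#'] k hk hneg
      set f := PySem.Chars.findFrom cs ['#'] (k : Int) with hfdef
      rw [pv_prefix_hash] at hpre
      have hf0 : 0 ≤ f := by omega
      have hflen : f.toNat < cs.length := by
        by_contra hbad
        rw [List.getElem?_eq_none (by simp; omega)] at hpre
        simp at hpre
      have hfhash : cs[f.toNat] = '#' := by
        rw [List.getElem?_eq_getElem (by simpa using hflen)] at hpre
        · simpa using hpre
      rw [pvLineHashes, if_neg hneg]
      have hcast : f + 1 = ((f.toNat + 1 : Nat) : Int) := by omega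
      rw [hcast]
      rw [ih (f.toNat + 1) (PySem.Set.add filled f) x (by omega) (by omega)]
      rw [PySem.Set.mem_add]
      constructor
      · rintro ((h | rfl) | ⟨j, hkj, hj, hc, rfl⟩)
        · exact Or.inl h
        · exact Or.inr ⟨f.toNat, by omega, hflen, hfhash, by omega⟩
        · exact Or.inr ⟨j, by omega, hj, hc, rfl⟩
      · rintro (h | ⟨j, hkj, hj, hc, rfl⟩)
        · exact Or.inl (Or.inl h)
        · by_cases hjf : j = f.toNat
          · subst hjf
            exact Or.inl (Or.inr (by omega))
          · rcases Nat.lt_or_ge j f.toNat with hlt | hge2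
            · exfalso
              apply hmin j hkj hlt
              rw [pv_prefix_hash, List.getElem?_drop]
              rw [Nat.add_zero, List.getElem?_eq_getElem hj, hc]
            · exact Or.inr ⟨j, by omega, hj, hc, rfl⟩

theorem pv_addLine_mem (filled : PySem.Set Int) (line : String) (x : Int) :
    x ∈ pvAddLine filled line ↔
      x ∈ filled ∨ ∃ j : Nat, ∃ h : j < line.toList.length, line.toList[j] = '#' ∧ x = (j : Int) := by
  rw [pvAddLine, ← PySem.Chars.findFrom_zero]
  rw [show (0 : Int) = ((0 : Nat) : Int) by rfl]
  rw [pv_lineHashes_mem line.toList (line.toList.length + 1) 0 filled x (by omega) (by omega)]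
  simp

theorem pv_filled_mem (sky : List String) :
    ∀ (filled : PySem.Set Int) (x : Int),
    (x ∈ sky.foldl pvAddLine filled ↔
      x ∈ filled ∨ ∃ line ∈ sky, ∃ j : Nat, ∃ h : j < line.toList.length, line.toList[j] = '#' ∧ x = (j : Int)) := by
  induction sky with
  | nil => simp
  | cons line rest ih =>
    intro filled x
    rw [List.foldl_cons, ih, pv_addLine_mem]
    simp only [List.mem_cons]
    constructor
    · rintro ((h | ⟨j, hj, hc, rfl⟩) | ⟨l, hl, hhit⟩)
      · exact Or.inl h
      · exact Or.inr ⟨line, Or.inl rfl, j, hj, hc, rfl⟩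
      · exact Or.inr ⟨l, Or.inr hl, hhit⟩
    · rintro (h | ⟨l, (rfl | hl), hhit⟩)
      · exact Or.inl (Or.inl h)
      · exact Or.inl (Or.inr hhit)
      · exact Or.inr ⟨l, hl, hhit⟩

theorem pv_contains_eq (sky : List String) (x : Int) (hx : 0 ≤ x) :
    PySem.Set.contains (sky.foldl pvAddLine PySem.Set.empty) x = pvHashAt sky x := by
  rw [Bool.eq_iff_iff, pvHashAt]
  simp only [PySem.Set.contains, List.contains_eq_mem, decide_eq_true_eq, List.any_eq_true,
    beq_iff_eq]
  rw [pv_filled_mem]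
  simp only [PySem.Set.empty, List.not_mem_nil, false_or]
  constructor
  · rintro ⟨line, hl, j, hj, hc, rfl⟩
    refine ⟨line, hl, ?_⟩
    rw [List.getElem?_eq_getElem (by simpa using hj)]
    simp [hc]
  · rintro ⟨line, hl, h⟩
    have hj : x.toNat < line.toList.length := by
      by_contra hbad
      rw [List.getElem?_eq_none (by omega)] at h
      simp at h
    rw [List.getElem?_eq_getElem hj] at h
    exact ⟨line, hl, x.toNat, hj, by simpa using h, by omega⟩

-- A's removal-phase filter predicate also equals !pvHashAt
theorem pv_predA_eq (sky : List String) (x : Int) (hx : 0 ≤ x) :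
    (!(sky.any (fun line =>
        (PySem.List.enumerate line.toList 0).any (fun p => p.2 == '#' && p.1 == x))))
    = !(pvHashAt sky x) := by
  rw [pvHashAt]
  congr 1
  apply congrArg
  funext line
  exact pv_anyEnum line.toList x hx

theorem pv_updFold_len (l cc : List Int) :
    (l.foldl (fun cc i => cc.set i.toNat (cc.getD i.toNat 0 + 999999)) cc).length = cc.length := by
  induction l generalizing cc with
  | nil => rfl
  | cons a t ih => rw [List.foldl_cons, ih, List.length_set]

theorem pv_addRow_closed (k : Nat) : ∀ (cc : List Int) (a : Int), 0 ≤ a → k = cc.length - a.toNat →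
    (PySem.List.pyRange a ((cc.length : Int)) 1).foldl
      (fun cc i => cc.set i.toNat (cc.getD i.toNat 0 + 999999)) cc
    = cc.take a.toNat ++ (cc.drop a.toNat).map (· + 999999) := by
  induction k with
  | zero =>
    intro cc a ha hk
    have hle : (cc.length : Int) ≤ a := by omega
    rw [PySem.List.pyRange_one_eq_nil hle, List.foldl_nil,
        List.take_of_length_le (by omega), List.drop_of_length_le (by omega)]
    simp
  | succ k ih =>
    intro cc a ha hk
    have hlt : a < (cc.length : Int) := by omega
    have hn : a.toNat < cc.length := by omega
    rw [PySem.List.pyRange_one_cons hlt, List.foldl_cons]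
    have hset : cc.set a.toNat (cc.getD a.toNat 0 + 999999)
        = cc.take a.toNat ++ (cc[a.toNat] + 999999) :: cc.drop (a.toNat + 1) := by
      rw [List.getD_eq_getElem cc 0 hn, List.set_eq_take_cons_drop _ hn]
    set cc' := cc.set a.toNat (cc.getD a.toNat 0 + 999999) with hcc'
    have hlen : cc'.length = cc.length := by rw [hcc', List.length_set]
    have := ih cc' (a + 1) (by omega) (by rw [hlen]; omega)
    rw [hlen] at this
    rw [this]
    have hton : (a + 1).toNat = a.toNat + 1 := by omega
    have h1 : (cc.take a.toNat).length = a.toNat := List.length_take_of_le (by omega)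
    rw [hton, hset]
    have e1 : (List.take a.toNat cc ++ (cc[a.toNat] + 999999) :: List.drop (a.toNat+1) cc).take (a.toNat+1)
        = List.take a.toNat cc ++ [cc[a.toNat] + 999999] := by
      rw [List.take_append, h1]
      simp
    have e2 : (List.take a.toNat cc ++ (cc[a.toNat] + 999999) :: List.drop (a.toNat+1) cc).drop (a.toNat+1)
        = List.drop (a.toNat+1) cc := by
      rw [List.drop_append, h1]
      simp
    rw [e1, e2, List.drop_eq_getElem_cons hn, List.map_cons]
    simp

theorem pv_addRow_len (cc : List Int) (col : Int) : (pvAddRow cc col).length = cc.length := by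
  rw [pvAddRow]; exact pv_updFold_len _ _

theorem pv_addRow_get (cc : List Int) (col : Int) (hc : 0 ≤ col) (j : Nat) (hj : j < cc.length)
    (hj' : j < (pvAddRow cc col).length) :
    (pvAddRow cc col)[j] = cc[j] + (if col < (j : Int) then 999999 else 0) := by
  have hcl : pvAddRow cc col = cc.take (col+1).toNat ++ (cc.drop (col+1).toNat).map (· + 999999) := by
    rw [pvAddRow]
    exact pv_addRow_closed (cc.length - (col+1).toNat) cc (col+1) (by omega) rfl
  set n := (col + 1).toNat with hn
  by_cases hlt : j < n
  · have : ¬ (col < (j : Int)) := by omega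
    rw [if_neg this, add_zero]
    simp only [hcl]
    rw [List.getElem_append_left (by rw [List.length_take]; omega)]
    rw [List.getElem_take]
  · have hcj : col < (j : Int) := by omega
    rw [if_pos hcj]
    simp only [hcl]
    have hn' : n ≤ cc.length ∨ n > cc.length := by omega
    have hnle : n ≤ cc.length := by omega
    have hlen : (cc.take n).length = n := List.length_take_of_le hnle
    rw [List.getElem_append_right (by omega)]
    simp only [hlen, List.getElem_map]
    congr 1
    rw [List.getElem_drop]
    congr 1
    omega

theorem pv_outerAdd_len (es cc : List Int) : (es.foldl pvAddRow cc).length = cc.length := by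
  induction es generalizing cc with
  | nil => rfl
  | cons c t ih => rw [List.foldl_cons, ih, pv_addRow_len]

theorem pv_outerAdd_get (es : List Int) : ∀ (cc : List Int), (∀ c ∈ es, 0 ≤ c) →
    ∀ (j : Nat) (hj : j < cc.length) (hj' : j < (es.foldl pvAddRow cc).length),
    (es.foldl pvAddRow cc)[j] = cc[j] + 999999 * ((es.countP (fun c => decide (c < (j : Int)))) : Int) := by
  induction es with
  | nil => intro cc _ j hj hj'; simp
  | cons c t ih =>
    intro cc hnn j hj hj'
    simp only [List.foldl_cons]
    have h1 : j < (pvAddRow cc c).length := by rw [pv_addRow_len]; exact hj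
    rw [ih (pvAddRow cc c) (fun x hx => hnn x (List.mem_cons_of_mem _ hx)) j h1
        (by rwa [pv_outerAdd_len, pv_addRow_len])]
    rw [pv_addRow_get cc c (hnn c List.mem_cons_self) j hj h1]
    rw [List.countP_cons]
    by_cases h : c < (j : Int) <;> simp [h] <;> push_cast <;> ring

theorem pv_bFold (p : Int → Bool) (m : Nat) :
    ((PySem.List.pyRange 0 (m : Int) 1).foldl
      (fun st i => (st.1 ++ [i + st.2], if p i then st.2 + 999999 else st.2))
      (([] : List Int), (0 : Int)))
    = ((List.range m).map (fun (j : Nat) => (j : Int) + 999999 * (((List.range j).countP (fun (k : Nat) => p (k : Int))) : Int)),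
       999999 * (((List.range m).countP (fun (k : Nat) => p (k : Int))) : Int)) := by
  induction m with
  | zero => simp
  | succ m ih =>
    have hcast : ((m + 1 : Nat) : Int) = (m : Int) + 1 := by push_cast; ring
    rw [hcast, PySem.List.pyRange_one_succ_right (by positivity), List.foldl_append, ih,
        List.foldl_cons, List.foldl_nil]
    rw [List.range_succ, List.map_append, List.countP_append]
    simp only [List.map_cons, List.map_nil, List.countP_cons, List.countP_nil]
    by_cases h : p (m : Int) <;> simp [h, mul_add] <;> push_cast <;> ring

theorem pv_countP_filter_range (q : Int → Bool) (wn j : Nat) :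
    (((PySem.List.pyRange 0 (wn : Int) 1).filter q).countP
        (fun c => decide (c < (j : Int))))
    = (List.range wn).countP (fun (k : Nat) => decide ((k : Int) < (j : Int)) && q (k : Int)) := by
  rw [List.countP_filter, PySem.List.pyRange_zero_nat, List.countP_map]
  rfl

theorem pv_count_restrict (q : Int → Bool) (wn j : Nat) (hj : j ≤ wn) :
    (List.range wn).countP (fun (k : Nat) => decide ((k : Int) < (j : Int)) && q (k : Int))
    = (List.range j).countP (fun (k : Nat) => q (k : Int)) := by
  have hw : wn = j + (wn - j) := by omega
  rw [hw, List.range_add, List.countP_append]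
  have h2 : ((List.range (wn - j)).map (fun x => j + x)).countP
      (fun (k : Nat) => decide ((k : Int) < (j : Int)) && q (k : Int)) = 0 := by
    rw [List.countP_eq_zero]
    intro a ha
    simp only [List.mem_map] at ha
    obtain ⟨x, hx, rfl⟩ := ha
    simp only [Bool.and_eq_true, decide_eq_true_eq]
    rintro ⟨h1, -⟩
    omega
  rw [h2, Nat.add_zero]
  apply List.countP_congr
  intro x hx
  simp only [List.mem_range] at hx
  simp only [Bool.and_eq_true, decide_eq_true_eq]
  constructor
  · rintro ⟨-, h⟩; exact h
  · intro h; exact ⟨by omega, h⟩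

theorem pv_main (sky : List String) : expand_cols sky = expand_cols_alt sky := by
  rw [expand_cols, expand_cols_alt]
  have hw0 : 0 ≤ PySem.Str.len ((PySem.List.pyGet? sky 0).getD "") := by
    rw [PySem.Str.len_eq]; positivity
  obtain ⟨wn, hwn⟩ : ∃ wn : Nat, PySem.Str.len ((PySem.List.pyGet? sky 0).getD "") = (wn : Int) :=
    ⟨(PySem.Str.len ((PySem.List.pyGet? sky 0).getD "")).toNat, by omega⟩
  simp only [hwn]
  rw [pv_bFold (fun i => !(PySem.Set.contains (sky.foldl pvAddLine PySem.Set.empty) i)) wn]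
  simp only []
  rw [pv_ofList_nodup _ (PySem.List.nodup_pyRange_one 0 _), pv_fold_removeLine]
  apply List.ext_getElem
  · rw [pv_outerAdd_len, PySem.List.length_pyRange_one, List.length_map, List.length_range]
    omega
  · intro j h1 h2
    have hjr : j < (PySem.List.pyRange 0 (wn : Int) 1).length := by
      rw [pv_outerAdd_len] at h1; exact h1
    have hjw : j < wn := by
      rw [PySem.List.length_pyRange_one] at hjr; omega
    have hnn : ∀ c ∈ (PySem.List.pyRange 0 (wn : Int) 1).filter (fun x => !(sky.any (fun line =>
        (PySem.List.enumerate line.toList 0).any (fun p => p.2 == '#' && p.1 == x)))), 0 ≤ c := by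
      intro c hc
      exact (PySem.List.mem_pyRange_one.mp (List.mem_of_mem_filter hc)).1
    rw [pv_outerAdd_get _ _ hnn j hjr h1]
    rw [pv_countP_filter_range _ wn j]
    have hA2B : (List.range wn).countP (fun (k : Nat) => decide ((k : Int) < (j : Int)) &&
          (!(sky.any (fun line =>
            (PySem.List.enumerate line.toList 0).any (fun p => p.2 == '#' && p.1 == (k : Int))))))
        = (List.range wn).countP (fun (k : Nat) => decide ((k : Int) < (j : Int)) &&
          (!(PySem.Set.contains (sky.foldl pvAddLine PySem.Set.empty) (k : Int)))) := by
      apply List.countP_congr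
      intro x hx
      rw [pv_predA_eq sky (x : Int) (by positivity), pv_contains_eq sky (x : Int) (by positivity)]
    rw [hA2B, pv_count_restrict (fun i => !(PySem.Set.contains (sky.foldl pvAddLine PySem.Set.empty) i)) wn j (by omega)]
    rw [PySem.List.getElem_pyRange_one 0 _ j hjr, List.getElem_map, List.getElem_range]
    ring

-- ===== VERDICT (by name: the statement is the Claim_ definition above) =====
theorem expand_cols_spec : Claim_equal_expand_cols := by
  intro sky _ _
  unfold Spec_expand_cols
  exact pv_main sky
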